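-- pv_equiv track=rewrite | github.com/Marshal1101/DataStructure-Algorithm-Study | programmers/04_brute_force_01_mock_exam.py | solution
-- ===== SOURCE A (Python) =====
-- from collections import deque
--
-- def solution(answers):
--     answer = []
--     check = deque(answers)
--     student1 = deque([1, 2, 3, 4, 5])
--     student2 = deque([2, 1, 2, 3, 2, 4, 2, 5])
--     student3 = deque([3, 3, 1, 1, 2, 2, 4, 4, 5, 5])
--     std1_point = 0
--     std2_point = 0
--     std3_point = 0
--     while check :
--         ans = check.popleft()
--         std1_ans = student1.popleft()
--         std2_ans = student2.popleft()
--         std3_ans = student3.popleft()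
--
--         if ans == std1_ans :
--             std1_point += 1
--         if ans == std2_ans :
--             std2_point += 1
--         if ans == std3_ans :
--             std3_point += 1
--
--         student1.append(std1_ans)
--         student2.append(std2_ans)
--         student3.append(std3_ans)
--
--     max_point = max(std1_point, std2_point, std3_point)
--     if max_point == std1_point :
--         answer.append(1)
--     if max_point == std2_point :
--         answer.append(2)
--     if max_point == std3_point :
--         answer.append(3)
--     return answer
-- ===== SOURCE B (Python) =====
-- def score(answers, pattern):
--     n = len(pattern)
--     return sum(1 for i, a in enumerate(answers) if a == pattern[i % n])
--
-- def solution(answers):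
--     p1 = score(answers, [1, 2, 3, 4, 5])
--     p2 = score(answers, [2, 1, 2, 3, 2, 4, 2, 5])
--     p3 = score(answers, [3, 3, 1, 1, 2, 2, 4, 4, 5, 5])
--     best = max(p1, p2, p3)
--     return [s for s, p in ((1, p1), (2, p2), (3, p3)) if p == best]
-- ===== Notes on version B (the rewrite author's own statement) =====
-- stated objective: idiomatic
-- what changed: Replaces the single fused loop over three rotating deques (popleft/append state) with three independent stateless passes, each scoring one fixed pattern by modular indexing (pattern[i % n]), then a comprehension over the three (student, points) pairs.
import Mathlib
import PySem

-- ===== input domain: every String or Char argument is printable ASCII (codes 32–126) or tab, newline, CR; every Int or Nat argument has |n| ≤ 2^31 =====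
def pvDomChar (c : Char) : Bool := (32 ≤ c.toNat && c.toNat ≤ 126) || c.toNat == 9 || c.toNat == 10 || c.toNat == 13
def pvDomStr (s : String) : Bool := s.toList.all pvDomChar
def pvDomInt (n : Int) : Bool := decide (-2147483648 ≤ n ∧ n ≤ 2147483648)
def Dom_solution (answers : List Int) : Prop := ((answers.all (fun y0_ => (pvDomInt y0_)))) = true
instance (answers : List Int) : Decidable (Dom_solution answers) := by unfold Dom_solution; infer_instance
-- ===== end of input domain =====

-- B replaces A's fused loop over three rotating deques by three independent
-- stateless scans with modular pattern indexing (objective: idiomatic).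

-- ===== PORT A =====
-- the while loop: pop an answer and the head of each deque, compare, re-append the head.
-- The `| _, _, _` branch is unreachable: the deques are nonempty literals and rotation
-- preserves nonemptiness (Python's popleft would raise only on an empty deque).
def solutionLoop : List Int → List Int → List Int → List Int → Int → Int → Int → Int × Int × Int
  | [], _, _, _, p1, p2, p3 => (p1, p2, p3)
  | a :: rest, d1, d2, d3, p1, p2, p3 =>
    match d1, d2, d3 with
    | h1 :: t1, h2 :: t2, h3 :: t3 =>
      solutionLoop rest (t1 ++ [h1]) (t2 ++ [h2]) (t3 ++ [h3])
        (if a = h1 then p1 + 1 else p1)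
        (if a = h2 then p2 + 1 else p2)
        (if a = h3 then p3 + 1 else p3)
    | _, _, _ => (p1, p2, p3)

def solution (answers : List Int) : List Int :=
  let r := solutionLoop answers [1, 2, 3, 4, 5] [2, 1, 2, 3, 2, 4, 2, 5]
             [3, 3, 1, 1, 2, 2, 4, 4, 5, 5] 0 0 0
  let maxPoint := max r.1 (max r.2.1 r.2.2)
  ((if maxPoint = r.1 then [(1 : Int)] else []) ++
   (if maxPoint = r.2.1 then [2] else []) ++
   (if maxPoint = r.2.2 then [3] else []))

-- ===== PORT B =====
-- score(answers, pattern): sum over enumerate(answers) of (a == pattern[i % n]);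
-- i % n is always a valid nonnegative index (n > 0), so getD is exact here.
def scoreAlt : List Int → List Int → Nat → Int
  | [], _, _ => 0
  | a :: rest, pat, i =>
    (if a = pat.getD (i % pat.length) 0 then 1 else 0) + scoreAlt rest pat (i + 1)

def solution_alt (answers : List Int) : List Int :=
  let p1 := scoreAlt answers [1, 2, 3, 4, 5] 0
  let p2 := scoreAlt answers [2, 1, 2, 3, 2, 4, 2, 5] 0
  let p3 := scoreAlt answers [3, 3, 1, 1, 2, 2, 4, 4, 5, 5] 0
  let best := max p1 (max p2 p3)
  ([((1 : Int), p1), (2, p2), (3, p3)].filter (fun sp => sp.2 == best)).map Prod.fst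

-- ===== PRECONDITION & SPEC =====
def Spec_solution (answers : List Int) (out : List Int) : Prop := out = solution_alt answers
instance (answers : List Int) (out : List Int) : Decidable (Spec_solution answers out) := by unfold Spec_solution; infer_instance

-- ===== CLAIM (what is proved, stated in full; the proofs are below) =====
def Claim_equal_solution : Prop := ∀ (answers : List Int), Dom_solution answers → Spec_solution answers (solution answers)

-- ===== LEMMAS AND PROOFS =====

-- rotating the pattern one step left shifts the cyclic index by one
theorem getD_rotl (h : Int) (t : List Int) (j : Nat) (hj : j < t.length + 1) :
    (t ++ [h]).getD j 0 = (h :: t).getD ((j + 1) % (t.length + 1)) 0 := by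
  rcases Nat.lt_or_ge j t.length with hlt | hge
  · rw [List.getD_append _ _ _ _ hlt, Nat.mod_eq_of_lt (by omega)]
    simp [List.getD, hlt]
  · have hj' : j = t.length := by omega
    subst hj'
    simp [List.getD]

theorem scoreAlt_rot (check : List Int) (h : Int) (t : List Int) (i : Nat) :
    scoreAlt check (t ++ [h]) i = scoreAlt check (h :: t) (i + 1) := by
  induction check generalizing i with
  | nil => rfl
  | cons a rest ih =>
    have hn : 0 < t.length + 1 := Nat.succ_pos _
    have hidx : (t ++ [h]).getD (i % (t ++ [h]).length) 0
        = (h :: t).getD ((i + 1) % (h :: t).length) 0 := by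
      have hl : (t ++ [h]).length = t.length + 1 := by simp
      rw [hl]
      rw [getD_rotl h t (i % (t.length + 1)) (Nat.mod_lt _ hn)]
      rw [Nat.mod_add_mod]
      simp
    simp only [scoreAlt, hidx, ih]

theorem loop_inv (check : List Int) :
    ∀ (d1 d2 d3 : List Int) (p1 p2 p3 : Int), d1 ≠ [] → d2 ≠ [] → d3 ≠ [] →
    solutionLoop check d1 d2 d3 p1 p2 p3 =
      (p1 + scoreAlt check d1 0, p2 + scoreAlt check d2 0, p3 + scoreAlt check d3 0) := by
  induction check with
  | nil => intro d1 d2 d3 p1 p2 p3 _ _ _; simp [solutionLoop, scoreAlt]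
  | cons a rest ih =>
    intro d1 d2 d3 p1 p2 p3 h1 h2 h3
    obtain ⟨x1, t1, rfl⟩ := List.exists_cons_of_ne_nil h1
    obtain ⟨x2, t2, rfl⟩ := List.exists_cons_of_ne_nil h2
    obtain ⟨x3, t3, rfl⟩ := List.exists_cons_of_ne_nil h3
    rw [show solutionLoop (a :: rest) (x1 :: t1) (x2 :: t2) (x3 :: t3) p1 p2 p3 =
        solutionLoop rest (t1 ++ [x1]) (t2 ++ [x2]) (t3 ++ [x3])
          (if a = x1 then p1 + 1 else p1) (if a = x2 then p2 + 1 else p2)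
          (if a = x3 then p3 + 1 else p3) from rfl]
    rw [ih _ _ _ _ _ _ (by simp) (by simp) (by simp)]
    rw [scoreAlt_rot, scoreAlt_rot, scoreAlt_rot]
    simp only [scoreAlt, List.getD_cons_zero, Nat.zero_mod]
    refine Prod.ext ?_ (Prod.ext ?_ ?_) <;> simp <;> split_ifs <;> ring

theorem pick (s1 s2 s3 : Int) :
    (if max s1 (max s2 s3) = s1 then [(1 : Int)] else []) ++
    (if max s1 (max s2 s3) = s2 then [2] else []) ++
    (if max s1 (max s2 s3) = s3 then [3] else [])
    = ([((1 : Int), s1), (2, s2), (3, s3)].filter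
        (fun sp => sp.2 == max s1 (max s2 s3))).map Prod.fst := by
  have h1 : (s1 = max s1 (max s2 s3)) ↔ (max s1 (max s2 s3) = s1) := eq_comm
  have h2 : (s2 = max s1 (max s2 s3)) ↔ (max s1 (max s2 s3) = s2) := eq_comm
  have h3 : (s3 = max s1 (max s2 s3)) ↔ (max s1 (max s2 s3) = s3) := eq_comm
  simp only [List.filter_cons, List.filter_nil, beq_iff_eq, h1, h2, h3]
  split_ifs <;> simp

-- ===== VERDICT (by name: the statement is the Claim_ definition above) =====
theorem solution_spec : Claim_equal_solution := by
  intro answers _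
  unfold Spec_solution solution solution_alt
  rw [loop_inv answers _ _ _ 0 0 0 (by simp) (by simp) (by simp)]
  simp only [zero_add]
  exact pick _ _ _
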